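-- pv_equiv track=rewrite | github.com/AmyLinck/FEA | topology.py | generate_duplicated_topology
-- ===== SOURCE A (Python) =====
-- def generate_duplicated_topology(d, width=2):
--     arbiters = list(range(0, d))
--     factors = list(zip(*[range(i, d) for i in range(0, width)]))
--     last_factor = factors[-1]
--     factors = factors + (width - 1) * [last_factor]
--     optimizers = []
--     for v in range(d):
--         optimizer = []
--         for i, factor in enumerate(factors):
--             if v in factor:
--                 optimizer.append(i)
--         optimizers.append(optimizer)
--     neighbors = []
--     for i, factor in enumerate(factors):
--         neighbor = []
--         for j, other_factor in enumerate(factors):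
--             if (i != j) and not set(factor).isdisjoint(set(other_factor)):
--                 neighbor.append(j)
--         neighbors.append(neighbor)
--     return factors, arbiters, optimizers, neighbors
-- ===== SOURCE B (Python) =====
-- def generate_duplicated_topology(d, width=2):
--     # Closed-form construction: factor i is the contiguous window starting at
--     # min(i, n-1), so optimizers and neighbors are pure index arithmetic --
--     # no scanning of all factors and no pairwise set-disjointness tests.
--     n = d - width + 1  # number of distinct windows
--     windows = [tuple(range(k, k + width)) for k in range(n)]
--     factors = windows + (width - 1) * [windows[-1]]
--     arbiters = list(range(d))
--     optimizers = []
--     for v in range(d):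
--         opt = list(range(max(0, v - width + 1), min(v, n - 1) + 1))
--         if v >= n - 1:
--             opt.extend(range(n, d))
--         optimizers.append(opt)
--     neighbors = []
--     for i in range(d):
--         e = min(i, n - 1)
--         cand = list(range(max(0, e - width + 1), min(n - 1, e + width - 1) + 1))
--         if e >= n - width:
--             cand.extend(range(n, d))
--         neighbors.append([j for j in cand if j != i])
--     return factors, arbiters, optimizers, neighbors
-- ===== Notes on version B (the rewrite author's own statement) =====
-- stated objective: faster
-- what changed: Every factor is the contiguous window [min(i,n-1), min(i,n-1)+width), so B computes each optimizer and neighbor list as closed-form index ranges instead of scanning all factors (and all pairs of factors) for membership/set-overlap.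
import Mathlib
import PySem

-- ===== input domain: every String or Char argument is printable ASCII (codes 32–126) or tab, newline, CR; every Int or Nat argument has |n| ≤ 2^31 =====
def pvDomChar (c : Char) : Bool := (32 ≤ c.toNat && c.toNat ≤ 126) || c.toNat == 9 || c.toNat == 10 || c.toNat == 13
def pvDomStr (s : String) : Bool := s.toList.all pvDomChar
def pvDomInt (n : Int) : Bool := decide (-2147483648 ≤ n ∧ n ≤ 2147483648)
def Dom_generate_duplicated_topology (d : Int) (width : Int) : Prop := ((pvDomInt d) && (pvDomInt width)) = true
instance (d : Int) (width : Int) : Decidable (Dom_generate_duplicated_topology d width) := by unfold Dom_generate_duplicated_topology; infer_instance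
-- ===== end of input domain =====

-- B replaces A's membership scans over all factors and its all-pairs set-disjointness scans by
-- closed-form index ranges (each factor is the contiguous window [min(i,n-1), min(i,n-1)+width)).

-- ===== PORT A =====
-- zip(*iterables): take heads while every iterable is nonempty (fuel = length of the first list bounds the steps)
def pvZipStar : Nat → List (List Int) → List (List Int)
  | 0, _ => []
  | fuel + 1, ls =>
      if !ls.isEmpty && ls.all (fun l => !l.isEmpty) then
        ls.map (fun l => l.headD 0) :: pvZipStar fuel (ls.map List.tail)
      else []

def generate_duplicated_topology (d : Int) (width : Int) : List (List Int) × List Int × List (List Int) × List (List Int) :=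
  let arbiters := PySem.List.pyRange 0 d 1
  let ranges := (PySem.List.pyRange 0 width 1).map (fun i => PySem.List.pyRange i d 1)
  let factors0 := pvZipStar (ranges.headD []).length ranges
  match PySem.List.pyGet? factors0 (-1) with
  | none => ([], [], [], [])   -- Python raises IndexError on factors[-1] here; excluded by Pre_
  | some last_factor =>
    let factors := factors0 ++ List.replicate (width - 1).toNat last_factor
    let optimizers := (PySem.List.pyRange 0 d 1).foldl (fun acc v =>
      acc ++ [(PySem.List.enumerate factors).foldl
        (fun opt p => if v ∈ p.2 then opt ++ [p.1] else opt) []]) []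
    let neighbors := (PySem.List.enumerate factors).foldl (fun acc p =>
      acc ++ [(PySem.List.enumerate factors).foldl
        (fun nbr q =>
          if p.1 ≠ q.1 ∧ ¬ (PySem.Set.isdisjoint (PySem.Set.ofList p.2) (PySem.Set.ofList q.2) = true)
          then nbr ++ [q.1] else nbr) []]) []
    (factors, arbiters, optimizers, neighbors)

-- ===== PORT B =====
def generate_duplicated_topology_alt (d : Int) (width : Int) : List (List Int) × List Int × List (List Int) × List (List Int) :=
  let n := d - width + 1
  let windows := (PySem.List.pyRange 0 n 1).map (fun k => PySem.List.pyRange k (k + width) 1)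
  match PySem.List.pyGet? windows (-1) with
  | none => ([], [], [], [])   -- Python raises IndexError on windows[-1] here; excluded by Pre_
  | some last =>
    let factors := windows ++ List.replicate (width - 1).toNat last
    let arbiters := PySem.List.pyRange 0 d 1
    let optimizers := (PySem.List.pyRange 0 d 1).map (fun v =>
      PySem.List.pyRange (max 0 (v - width + 1)) (min v (n - 1) + 1) 1 ++
        (if n - 1 ≤ v then PySem.List.pyRange n d 1 else []))
    let neighbors := (PySem.List.pyRange 0 d 1).map (fun i =>
      let e := min i (n - 1)
      (PySem.List.pyRange (max 0 (e - width + 1)) (min (n - 1) (e + width - 1) + 1) 1 ++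
      (if n - width ≤ e then PySem.List.pyRange n d 1 else [])).filter (fun j => j ≠ i))
    (factors, arbiters, optimizers, neighbors)

-- ===== PRECONDITION & SPEC =====
-- Pre_ excludes exactly the inputs (width < 1 or d < width) on which A raises IndexError at factors[-1]
-- (B likewise raises IndexError at windows[-1] whenever d < width).
def Pre_generate_duplicated_topology (d : Int) (width : Int) : Prop := 1 ≤ width ∧ width ≤ d
instance (d : Int) (width : Int) : Decidable (Pre_generate_duplicated_topology d width) := by
  unfold Pre_generate_duplicated_topology; infer_instance
def pvWitness_generate_duplicated_topology : Int × Int := (5, 2)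

def Spec_generate_duplicated_topology (d : Int) (width : Int) (out : List (List Int) × List Int × List (List Int) × List (List Int)) : Prop := out = generate_duplicated_topology_alt d width
instance (d : Int) (width : Int) (out : List (List Int) × List Int × List (List Int) × List (List Int)) : Decidable (Spec_generate_duplicated_topology d width out) := by unfold Spec_generate_duplicated_topology; infer_instance

-- ===== CLAIM (what is proved, stated in full; the proofs are below) =====
def Claim_equal_generate_duplicated_topology : Prop := ∀ (d : Int) (width : Int), Dom_generate_duplicated_topology d width → Pre_generate_duplicated_topology d width → Spec_generate_duplicated_topology d width (generate_duplicated_topology d width)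

-- ===== LEMMAS AND PROOFS =====

theorem pvShiftRange (a u v : Int) :
    (PySem.List.pyRange u v 1).map (fun i => a + i) = PySem.List.pyRange (a + u) (a + v) 1 := by
  rw [PySem.List.pyRange_one u v, PySem.List.pyRange_one (a + u) (a + v), List.map_map]
  have h : a + v - (a + u) = v - u := by ring
  rw [h]
  apply List.map_congr_left
  intro k _
  simp [Function.comp]
  ring

theorem pvFilterIcc (lo hi : Int) : ∀ (b a : Int),
    (PySem.List.pyRange a b 1).filter (fun i => decide (lo ≤ i ∧ i < hi))
      = PySem.List.pyRange (max a lo) (min b hi) 1 := by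
  intro b
  suffices H : ∀ (k : Nat) (a : Int), (b - a).toNat = k →
      (PySem.List.pyRange a b 1).filter (fun i => decide (lo ≤ i ∧ i < hi))
        = PySem.List.pyRange (max a lo) (min b hi) 1 by
    intro a; exact H _ a rfl
  intro k
  induction k with
  | zero =>
    intro a ha
    rw [PySem.List.pyRange_one_eq_nil (by omega), PySem.List.pyRange_one_eq_nil (by omega)]
    rfl
  | succ k ih =>
    intro a ha
    rw [PySem.List.pyRange_one_cons (by omega : a < b), List.filter_cons]
    by_cases hc : lo ≤ a ∧ a < hi
    · rw [if_pos (by simpa using hc), ih (a + 1) (by omega)]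
      have h1 : max a lo = a := by omega
      have h2 : max (a + 1) lo = a + 1 := by omega
      have h3 : a < min b hi := by omega
      rw [h1, h2, PySem.List.pyRange_one_cons h3]
    · rw [if_neg (by simpa using hc), ih (a + 1) (by omega)]
      by_cases h4 : a < lo
      · have : max a lo = max (a + 1) lo := by omega
        rw [this]
      · have h5 : hi ≤ a := by omega
        rw [PySem.List.pyRange_one_eq_nil (by omega), PySem.List.pyRange_one_eq_nil (by omega)]

theorem pvZipStar_ranges (dd w : Int) (hw : 1 ≤ w) : ∀ (fuel : Nat) (a : Int),
    (dd - w + 1 - a).toNat ≤ fuel →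
    pvZipStar fuel ((PySem.List.pyRange 0 w 1).map (fun i => PySem.List.pyRange (a + i) dd 1))
      = (PySem.List.pyRange a (dd - w + 1) 1).map (fun k => PySem.List.pyRange k (k + w) 1) := by
  intro fuel
  induction fuel with
  | zero =>
    intro a ha
    rw [PySem.List.pyRange_one_eq_nil (show dd - w + 1 ≤ a by omega)]
    rfl
  | succ fuel ih =>
    intro a ha
    by_cases hlt : a < dd - w + 1
    · have hcond : (!((PySem.List.pyRange 0 w 1).map (fun i => PySem.List.pyRange (a + i) dd 1)).isEmpty
          && ((PySem.List.pyRange 0 w 1).map (fun i => PySem.List.pyRange (a + i) dd 1)).all (fun l => !l.isEmpty)) = true := by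
        rw [Bool.and_eq_true]
        constructor
        · simp [PySem.List.pyRange_one_cons (show (0 : Int) < w by omega)]
        · rw [List.all_eq_true]
          intro l hl
          simp only [List.mem_map] at hl
          obtain ⟨i, hi, rfl⟩ := hl
          rw [PySem.List.mem_pyRange_one] at hi
          simp [PySem.List.pyRange_one_cons (show a + i < dd by omega)]
      rw [pvZipStar, if_pos hcond]
      have hheads : ((PySem.List.pyRange 0 w 1).map (fun i => PySem.List.pyRange (a + i) dd 1)).map (fun l => l.headD 0)
          = PySem.List.pyRange a (a + w) 1 := by
        rw [List.map_map]
        have hc : ∀ i ∈ PySem.List.pyRange 0 w 1,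
            ((fun l => l.headD 0) ∘ fun i => PySem.List.pyRange (a + i) dd 1) i = a + i := by
          intro i hi
          rw [PySem.List.mem_pyRange_one] at hi
          simp [Function.comp, PySem.List.pyRange_one_cons (show a + i < dd by omega)]
        rw [List.map_congr_left hc]
        simpa using pvShiftRange a 0 w
      have htails : ((PySem.List.pyRange 0 w 1).map (fun i => PySem.List.pyRange (a + i) dd 1)).map List.tail
          = (PySem.List.pyRange 0 w 1).map (fun i => PySem.List.pyRange ((a + 1) + i) dd 1) := by
        rw [List.map_map]
        apply List.map_congr_left
        intro i hi
        rw [PySem.List.mem_pyRange_one] at hi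
        simp only [Function.comp]
        rw [PySem.List.pyRange_one_cons (show a + i < dd by omega)]
        simp only [List.tail_cons]
        congr 1
        ring
      rw [hheads, htails, ih (a + 1) (by omega)]
      rw [PySem.List.pyRange_one_cons hlt, List.map_cons]
    · have hcond : (!((PySem.List.pyRange 0 w 1).map (fun i => PySem.List.pyRange (a + i) dd 1)).isEmpty
          && ((PySem.List.pyRange 0 w 1).map (fun i => PySem.List.pyRange (a + i) dd 1)).all (fun l => !l.isEmpty)) = false := by
        rw [Bool.and_eq_false_iff]
        right
        rw [List.all_eq_false]
        refine ⟨PySem.List.pyRange (a + (w - 1)) dd 1, List.mem_map_of_mem ?_, ?_⟩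
        · rw [PySem.List.mem_pyRange_one]; omega
        · rw [PySem.List.pyRange_one_eq_nil (show dd ≤ a + (w - 1) by omega)]
          simp
      rw [pvZipStar, if_neg (by rw [hcond]; simp), PySem.List.pyRange_one_eq_nil (show dd - w + 1 ≤ a by omega)]
      rfl

theorem pvEnumFoldFilter (D : Int) (hD : 0 ≤ D) (G : Int → List Int)
    (q : Int × List Int → Prop) [DecidablePred q] :
    (PySem.List.enumerate ((PySem.List.pyRange 0 D 1).map G)).foldl
      (fun acc p => if q p then acc ++ [p.1] else acc) []
    = (PySem.List.pyRange 0 D 1).filter (fun j => decide (q (j, G j))) := by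
  rw [PySem.List.enumerate_eq_map_pyRange _ ([] : List Int)]
  have hlen : PySem.List.len ((PySem.List.pyRange 0 D 1).map G) = D := by
    simp [PySem.List.len_eq, PySem.List.length_pyRange_one, Int.toNat_of_nonneg hD]
  rw [hlen]
  rw [PySem.List.foldl_append_ite q (fun p => p.1)]
  rw [List.filter_map, List.map_map, List.nil_append]
  have hcong : (PySem.List.pyRange 0 D 1).filter
        ((fun x => decide (q x)) ∘ fun j => (j, PySem.List.pyGetD ((PySem.List.pyRange 0 D 1).map G) j []))
      = (PySem.List.pyRange 0 D 1).filter (fun j => decide (q (j, G j))) := by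
    apply List.filter_congr
    intro j hj
    rw [PySem.List.mem_pyRange_one] at hj
    simp only [Function.comp]
    rw [decide_eq_decide, PySem.List.pyGetD_map_pyRange_of_nonneg G D j [] hj.1 hj.2]
  rw [hcong]
  have hid : ((fun p : Int × List Int => p.1) ∘ fun j => (j, PySem.List.pyGetD ((PySem.List.pyRange 0 D 1).map G) j [])) = fun j => j := rfl
  rw [hid, List.map_id']

theorem pvEnumFoldMap {β : Type} (D : Int) (hD : 0 ≤ D) {G : Int → List Int} {h : Int × List Int → β} :
    (PySem.List.enumerate ((PySem.List.pyRange 0 D 1).map G)).foldl (fun acc p => acc ++ [h p]) []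
      = (PySem.List.pyRange 0 D 1).map (fun i => h (i, G i)) := by
  rw [PySem.List.enumerate_eq_map_pyRange _ ([] : List Int)]
  have hlen : PySem.List.len ((PySem.List.pyRange 0 D 1).map G) = D := by
    simp [PySem.List.len_eq, PySem.List.length_pyRange_one, Int.toNat_of_nonneg hD]
  rw [hlen, PySem.List.foldl_append_singleton_eq_map, List.nil_append, List.map_map]
  apply List.map_congr_left
  intro j hj
  rw [PySem.List.mem_pyRange_one] at hj
  simp only [Function.comp]
  rw [PySem.List.pyGetD_map_pyRange_of_nonneg G D j [] hj.1 hj.2]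

theorem pvOverlapIff (a b w : Int) :
    (¬ PySem.Set.isdisjoint (PySem.Set.ofList (PySem.List.pyRange a (a + w) 1))
        (PySem.Set.ofList (PySem.List.pyRange b (b + w) 1)) = true)
      ↔ (b < a + w ∧ a < b + w) := by
  rw [PySem.Set.isdisjoint_iff]
  constructor
  · intro h
    push Not at h
    obtain ⟨x, hx1, hx2⟩ := h
    rw [PySem.Set.mem_ofList, PySem.List.mem_pyRange_one] at hx1
    rw [PySem.Set.mem_ofList, PySem.List.mem_pyRange_one] at hx2
    omega
  · intro h hall
    have := hall (max a b) (by rw [PySem.Set.mem_ofList, PySem.List.mem_pyRange_one]; omega)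
    rw [PySem.Set.mem_ofList, PySem.List.mem_pyRange_one] at this
    omega

-- ===== VERDICT (by name: the statement is the Claim_ definition above) =====
theorem generate_duplicated_topology_spec : Claim_equal_generate_duplicated_topology := by
  intro d width hdom hpre
  obtain ⟨hw, hd⟩ := hpre
  have hd0 : (0 : Int) ≤ d := by omega
  unfold Spec_generate_duplicated_topology
  dsimp only [generate_duplicated_topology, generate_duplicated_topology_alt]
  have hmap : (PySem.List.pyRange 0 width 1).map (fun i => PySem.List.pyRange i d 1)
      = (PySem.List.pyRange 0 width 1).map (fun i => PySem.List.pyRange (0 + i) d 1) :=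
    List.map_congr_left (fun i _ => by rw [Int.zero_add])
  rw [hmap]
  have hfuel : (((PySem.List.pyRange 0 width 1).map (fun i => PySem.List.pyRange (0 + i) d 1)).headD []).length = d.toNat := by
    rw [PySem.List.pyRange_one_cons (show (0 : Int) < width by omega), List.map_cons, List.headD_cons,
      PySem.List.length_pyRange_one]
    norm_num
  rw [hfuel, pvZipStar_ranges d width hw d.toNat 0 (by omega)]
  set n := d - width + 1 with hn
  have hn1 : n - 1 + 1 = n := by omega
  have hlast : PySem.List.pyGet?
      ((PySem.List.pyRange 0 n 1).map (fun k => PySem.List.pyRange k (k + width) 1)) (-1)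
      = some (PySem.List.pyRange (n - 1) (n - 1 + width) 1) := by
    have hsplit : PySem.List.pyRange 0 n 1 = PySem.List.pyRange 0 (n - 1) 1 ++ [n - 1] := by
      conv_lhs => rw [← hn1]
      rw [PySem.List.pyRange_one_succ_right (show (0 : Int) ≤ n - 1 by omega)]
    rw [PySem.List.pyGet?_neg_one, hsplit, List.map_append, List.map_cons, List.map_nil,
      List.getLast?_concat]
  rw [hlast]
  dsimp only
  have hfactors : (PySem.List.pyRange 0 n 1).map (fun k => PySem.List.pyRange k (k + width) 1)
        ++ List.replicate (width - 1).toNat (PySem.List.pyRange (n - 1) (n - 1 + width) 1)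
      = (PySem.List.pyRange 0 d 1).map (fun i => PySem.List.pyRange (min i (n - 1)) (min i (n - 1) + width) 1) := by
    rw [PySem.List.pyRange_one_append 0 n d (by omega) (by omega), List.map_append]
    congr 1
    · apply List.map_congr_left
      intro k hk
      rw [PySem.List.mem_pyRange_one] at hk
      rw [show min k (n - 1) = k by omega]
    · have hconst : ∀ i ∈ PySem.List.pyRange n d 1,
          PySem.List.pyRange (min i (n - 1)) (min i (n - 1) + width) 1
            = PySem.List.pyRange (n - 1) (n - 1 + width) 1 := by
        intro i hi
        rw [PySem.List.mem_pyRange_one] at hi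
        rw [show min i (n - 1) = n - 1 by omega]
      rw [List.map_congr_left hconst, List.map_const', PySem.List.length_pyRange_one,
        show (d - n).toNat = (width - 1).toNat by omega]
  rw [hfactors]
  simp only [Prod.mk.injEq]
  refine ⟨trivial, trivial, ?_, ?_⟩
  · -- optimizers
    rw [PySem.List.foldl_append_singleton_eq_map, List.nil_append]
    apply List.map_congr_left
    intro v hv
    rw [PySem.List.mem_pyRange_one] at hv
    rw [pvEnumFoldFilter d hd0 _ (fun p => v ∈ p.2)]
    rw [PySem.List.pyRange_one_append 0 n d (by omega) (by omega), List.filter_append]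
    congr 1
    · have hcg : ∀ j ∈ PySem.List.pyRange 0 n 1,
          decide (v ∈ PySem.List.pyRange (min j (n - 1)) (min j (n - 1) + width) 1)
            = decide (v - width + 1 ≤ j ∧ j < v + 1) := by
        intro j hj
        rw [PySem.List.mem_pyRange_one] at hj
        rw [decide_eq_decide, show min j (n - 1) = j by omega, PySem.List.mem_pyRange_one]
        omega
      rw [List.filter_congr hcg, pvFilterIcc, show min n (v + 1) = min v (n - 1) + 1 by omega,
        show max 0 (v - width + 1) = max 0 (v - width + 1) from rfl]
    · have hcg2 : ∀ j ∈ PySem.List.pyRange n d 1,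
          decide (v ∈ PySem.List.pyRange (min j (n - 1)) (min j (n - 1) + width) 1)
            = decide (n - 1 ≤ v) := by
        intro j hj
        rw [PySem.List.mem_pyRange_one] at hj
        rw [decide_eq_decide, show min j (n - 1) = n - 1 by omega, PySem.List.mem_pyRange_one]
        omega
      rw [List.filter_congr hcg2]
      by_cases hc : n - 1 ≤ v
      · simp [hc]
      · simp [hc]
  · -- neighbors
    rw [pvEnumFoldMap d hd0]
    apply List.map_congr_left
    intro i hi
    rw [PySem.List.mem_pyRange_one] at hi
    rw [pvEnumFoldFilter d hd0 _ (fun q =>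
      (i, PySem.List.pyRange (min i (n - 1)) (min i (n - 1) + width) 1).1 ≠ q.1 ∧
        ¬ PySem.Set.isdisjoint
          (PySem.Set.ofList (i, PySem.List.pyRange (min i (n - 1)) (min i (n - 1) + width) 1).2)
          (PySem.Set.ofList q.2) = true)]
    dsimp only
    set e := min i (n - 1) with he
    have hcg3 : ∀ j ∈ PySem.List.pyRange 0 d 1,
        decide (i ≠ j ∧ ¬ PySem.Set.isdisjoint (PySem.Set.ofList (PySem.List.pyRange e (e + width) 1))
            (PySem.Set.ofList (PySem.List.pyRange (min j (n - 1)) (min j (n - 1) + width) 1)) = true)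
          = (decide (j ≠ i) && decide (¬ PySem.Set.isdisjoint (PySem.Set.ofList (PySem.List.pyRange e (e + width) 1))
            (PySem.Set.ofList (PySem.List.pyRange (min j (n - 1)) (min j (n - 1) + width) 1)) = true)) := by
      intro j hj
      rw [Bool.decide_and]
      congr 1
      rw [decide_eq_decide]
      exact ne_comm
    rw [List.filter_congr hcg3, ← List.filter_filter]
    congr 1
    rw [PySem.List.pyRange_one_append 0 n d (by omega) (by omega), List.filter_append]
    congr 1
    · have hcg4 : ∀ j ∈ PySem.List.pyRange 0 n 1,
          decide (¬ PySem.Set.isdisjoint (PySem.Set.ofList (PySem.List.pyRange e (e + width) 1))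
              (PySem.Set.ofList (PySem.List.pyRange (min j (n - 1)) (min j (n - 1) + width) 1)) = true)
            = decide (e - width + 1 ≤ j ∧ j < e + width) := by
        intro j hj
        rw [PySem.List.mem_pyRange_one] at hj
        rw [show min j (n - 1) = j by omega, decide_eq_decide, pvOverlapIff]
        omega
      rw [List.filter_congr hcg4, pvFilterIcc, show min n (e + width) = min (n - 1) (e + width - 1) + 1 by omega]
    · have hcg5 : ∀ j ∈ PySem.List.pyRange n d 1,
          decide (¬ PySem.Set.isdisjoint (PySem.Set.ofList (PySem.List.pyRange e (e + width) 1))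
              (PySem.Set.ofList (PySem.List.pyRange (min j (n - 1)) (min j (n - 1) + width) 1)) = true)
            = decide (n - width ≤ e) := by
        intro j hj
        rw [PySem.List.mem_pyRange_one] at hj
        rw [show min j (n - 1) = n - 1 by omega, decide_eq_decide, pvOverlapIff]
        omega
      rw [List.filter_congr hcg5]
      by_cases hc : n - width ≤ e
      · simp [hc]
      · simp [hc]
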